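-- pv_equiv track=rewrite | github.com/WillH22/Introduction | unit 22/2/tools.py | min_max_keys
-- ===== SOURCE A (Python) =====
-- def min_max_keys(d):
--     min_key = None
--     max_key = None
--
--     for key in d:
--         if min_key is None or key < min_key:
--             min_key = key
--         if max_key is None or key > max_key:
--             max_key = key
--
--     return min_key, max_key
-- ===== SOURCE B (Python) =====
-- def min_max_keys(d):
--     if not d:
--         return None, None
--     return min(d), max(d)
-- ===== Notes on version B (the rewrite author's own statement) =====
-- stated objective: simpler
-- what changed: Replaces A's single loop that threads two Option accumulators with an empty guard followed by the built-in min and max, each making its own scan over the keys.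
import Mathlib
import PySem

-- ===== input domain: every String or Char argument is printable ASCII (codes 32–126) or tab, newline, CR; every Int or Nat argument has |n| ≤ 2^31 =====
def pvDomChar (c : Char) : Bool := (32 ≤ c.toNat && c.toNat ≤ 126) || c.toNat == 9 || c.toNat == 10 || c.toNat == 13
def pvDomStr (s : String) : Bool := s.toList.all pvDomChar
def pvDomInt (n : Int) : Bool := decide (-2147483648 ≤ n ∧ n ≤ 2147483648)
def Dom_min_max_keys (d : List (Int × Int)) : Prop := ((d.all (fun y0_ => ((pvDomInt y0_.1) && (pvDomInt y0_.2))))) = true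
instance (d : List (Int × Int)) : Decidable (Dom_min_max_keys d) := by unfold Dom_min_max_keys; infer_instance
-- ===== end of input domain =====

-- B replaces A's single two-accumulator loop with an empty guard plus the built-in min and max (simpler).

-- ===== PORT A =====
-- literal port of A: one pass over the keys, two Option accumulators updated in branch order
def min_max_keys (d : List (Int × Int)) : Option Int × Option Int :=
  (d.map Prod.fst).foldl
    (fun s key =>
      let mn := match s.1 with
        | none => some key
        | some m => if key < m then some key else some m
      let mx := match s.2 with
        | none => some key
        | some m => if key > m then some key else some m
      (mn, mx))
    (none, none)

-- ===== PORT B =====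
-- literal port of B: empty guard, then min(d) and max(d) via PySem.List.min?/max?
def min_max_keys_alt (d : List (Int × Int)) : Option Int × Option Int :=
  if d = [] then (none, none)
  else (PySem.List.min? (d.map Prod.fst) (fun x => x),
        PySem.List.max? (d.map Prod.fst) (fun x => x))

-- ===== PRECONDITION & SPEC =====
def Spec_min_max_keys (d : List (Int × Int)) (out : Option Int × Option Int) : Prop := out = min_max_keys_alt d
instance (d : List (Int × Int)) (out : Option Int × Option Int) : Decidable (Spec_min_max_keys d out) := by unfold Spec_min_max_keys; infer_instance

-- ===== CLAIM (what is proved, stated in full; the proofs are below) =====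
def Claim_equal_min_max_keys : Prop := ∀ (d : List (Int × Int)), Dom_min_max_keys d → Spec_min_max_keys d (min_max_keys d)

-- ===== LEMMAS AND PROOFS =====

lemma minmax_fold_pair (t : List Int) (a b : Int) :
    t.foldl
      (fun (s : Option Int × Option Int) key =>
        let mn := match s.1 with
          | none => some key
          | some m => if key < m then some key else some m
        let mx := match s.2 with
          | none => some key
          | some m => if key > m then some key else some m
        (mn, mx))
      (some a, some b)
    = (some (t.foldl min a), some (t.foldl max b)) := by
  induction t generalizing a b with
  | nil => simp
  | cons y t ih =>
      simp only [List.foldl_cons]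
      have h1 : (if y < a then some y else some a) = some (min a y) := by
        split_ifs <;> simp [min_def] <;> omega
      have h2 : (if y > b then some y else some b) = some (max b y) := by
        split_ifs <;> simp [max_def] <;> omega
      simpa [h1, h2] using ih (min a y) (max b y)

-- ===== VERDICT (by name: the statement is the Claim_ definition above) =====
theorem min_max_keys_spec : Claim_equal_min_max_keys := by
  intro d _
  unfold Spec_min_max_keys min_max_keys min_max_keys_alt
  cases d with
  | nil => simp
  | cons p t =>
      simp only [List.map_cons, List.foldl_cons,
        PySem.List.min?_id_cons, PySem.List.max?_id_cons]
      simpa using minmax_fold_pair (t.map Prod.fst) p.1 p.1
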